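-- pv_equiv track=rewrite | github.com/linhandev/cleansing | cleansing/image/routine/deduplicate.py | strict
-- ===== SOURCE A (Python) =====
-- from collections import defaultdict
--
-- def strict(digests, key="md5"):
--     dig_dict = defaultdict(lambda: [])
--     for idx, digest in enumerate(digests):
--         dig_dict[digest[key]].append(idx)
--     res = []
--     for paths in dig_dict.values():
--         if len(paths) != 1:
--             res.append(paths)
--     return res
-- ===== SOURCE B (Python) =====
-- def strict(digests, key="md5"):
--     keys = [d[key] for d in digests]
--
--     def collect(remaining):
--         if not remaining:
--             return []
--         k = remaining[0]
--         group = [j for j, k2 in enumerate(keys) if k2 == k]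
--         rest = collect([x for x in remaining[1:] if x != k])
--         return [group] + rest if len(group) > 1 else rest
--
--     return collect(keys)
-- ===== Notes on version B (the rewrite author's own statement) =====
-- stated objective: alternative
-- what changed: A groups all indices by digest key in a defaultdict and then filters out singleton value lists; B uses no dict at all: it recurses over the key list, taking the first remaining key, scanning the whole key list for that key's index group, and recursing on the remainder with that key filtered out.
import Mathlib
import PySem

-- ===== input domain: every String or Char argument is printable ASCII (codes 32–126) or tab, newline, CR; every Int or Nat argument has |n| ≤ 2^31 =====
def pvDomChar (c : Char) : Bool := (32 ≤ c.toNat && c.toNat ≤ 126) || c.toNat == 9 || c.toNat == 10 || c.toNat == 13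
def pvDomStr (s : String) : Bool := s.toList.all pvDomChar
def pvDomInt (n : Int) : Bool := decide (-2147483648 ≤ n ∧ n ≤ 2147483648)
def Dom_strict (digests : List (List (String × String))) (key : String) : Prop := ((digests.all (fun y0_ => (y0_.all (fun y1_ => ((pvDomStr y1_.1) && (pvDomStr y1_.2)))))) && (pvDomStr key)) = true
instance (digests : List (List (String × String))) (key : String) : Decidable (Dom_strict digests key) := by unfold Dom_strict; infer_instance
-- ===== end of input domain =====

-- B replaces A's dict grouping (build every group, then filter singletons) with a dict-free
-- recursion: take the first remaining key, scan the whole list for its index group, recurse on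
-- the remainder with that key removed; objective: alternative (quadratic but structurally simpler).


-- ===== PORT A =====
-- digest[key]: first-match lookup in the association list; total under Pre_strict (key present),
-- where it is exactly Python's digest[key]
def pvKey (dg : List (String × String)) (key : String) : String :=
  (PySem.Dict.mk dg).getD key ""

def strict (digests : List (List (String × String))) (key : String) : List (List Int) :=
  let digDict : PySem.Dict String (List Int) :=
    (PySem.List.enumerate digests).foldl
      (fun d p => d.modify (pvKey p.2 key) [] (· ++ [p.1])) PySem.Dict.empty
  digDict.values.foldl (fun res paths => if paths.length ≠ 1 then res ++ [paths] else res) []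

-- ===== PORT B =====
-- collect(remaining): group of remaining[0] scanned from the full key list, then recurse on
-- remaining[1:] with that key filtered out
def strictAltCollect (keys : List String) (remaining : List String) : List (List Int) :=
  match remaining with
  | [] => []
  | k :: t =>
    let group : List Int := ((PySem.List.enumerate keys).filter (fun q => q.2 == k)).map (·.1)
    let rest := strictAltCollect keys (t.filter (fun x => !(x == k)))
    if 1 < group.length then [group] ++ rest else rest
termination_by remaining.length
decreasing_by
  simp only [List.length_unattach, List.length_cons, Nat.lt_succ_iff]
  exact le_trans (List.length_filter_le _ _) (by simp)

def strict_alt (digests : List (List (String × String))) (key : String) : List (List Int) :=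
  let keys := digests.map (fun d => pvKey d key)
  strictAltCollect keys keys

-- ===== PRECONDITION & SPEC =====
-- Pre_strict: key occurs in every digest dict — exactly where Python's digest[key] does not raise KeyError.
def Pre_strict (digests : List (List (String × String))) (key : String) : Prop :=
  (digests.all (fun dg => (PySem.Dict.mk dg).contains key)) = true
instance (digests : List (List (String × String))) (key : String) : Decidable (Pre_strict digests key) := by unfold Pre_strict; infer_instance

def pvWitness_strict : (List (List (String × String))) × String :=
  ([[("md5", "a")], [("md5", "a")], [("md5", "b")]], "md5")

def Spec_strict (digests : List (List (String × String))) (key : String) (out : List (List Int)) : Prop := out = strict_alt digests key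
instance (digests : List (List (String × String))) (key : String) (out : List (List Int)) : Decidable (Spec_strict digests key out) := by unfold Spec_strict; infer_instance

-- ===== CLAIM (what is proved, stated in full; the proofs are below) =====
def Claim_equal_strict : Prop := ∀ (digests : List (List (String × String))) (key : String), Dom_strict digests key → Pre_strict digests key → Spec_strict digests key (strict digests key)

-- ===== LEMMAS AND PROOFS =====

-- proof-only abbreviations: the key sequence, the (key, index) pairs, the group of a key
def pvKs (digests : List (List (String × String))) (key : String) : List String :=
  digests.map (fun d => pvKey d key)
def pvPairs (digests : List (List (String × String))) (key : String) : List (String × Int) :=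
  (PySem.List.enumerate digests).map (fun p => (pvKey p.2 key, p.1))
def pvGrp (digests : List (List (String × String))) (key : String) (k : String) : List Int :=
  ((pvPairs digests key).filter (fun p => p.1 == k)).map (·.2)
-- B's group of key k, scanned from the key list
def pvGrpE (keys : List String) (k : String) : List Int :=
  ((PySem.List.enumerate keys).filter (fun q => q.2 == k)).map (·.1)

theorem map_fst_pvPairs (digests : List (List (String × String))) (key : String) :
    (pvPairs digests key).map (·.1) = pvKs digests key := by
  simp only [pvPairs, pvKs, List.map_map]
  have : ((fun p : String × Int => p.1) ∘ fun p : Int × List (String × String) => (pvKey p.2 key, p.1))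
      = (fun p => pvKey p.2 key) := rfl
  rw [this]
  calc (PySem.List.enumerate digests).map (fun p => pvKey p.2 key)
      = ((PySem.List.enumerate digests).map (fun p => p.2)).map (fun d => pvKey d key) := by
        rw [List.map_map]; rfl
    _ = digests.map (fun d => pvKey d key) := by rw [PySem.List.map_snd_enumerate]

theorem pvGrp_length (digests : List (List (String × String))) (key : String) (k : String) :
    (pvGrp digests key k).length = (pvKs digests key).count k := by
  rw [pvGrp, List.length_map, ← List.countP_eq_length_filter, List.count_eq_countP,
    ← map_fst_pvPairs digests key, List.countP_map]
  rfl

-- A's dict, characterized: first-occurrence keys, singleton groups filtered out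
theorem strict_eq_filter (digests : List (List (String × String))) (key : String) :
    strict digests key =
      ((PySem.Set.ofList (pvKs digests key)).filter
        (fun k => decide ((pvGrp digests key k).length ≠ 1))).map (pvGrp digests key) := by
  unfold strict
  have hfold : (PySem.List.enumerate digests).foldl
      (fun d p => d.modify (pvKey p.2 key) [] (· ++ [p.1])) PySem.Dict.empty
      = (pvPairs digests key).foldl (fun d q => d.modify q.1 [] (· ++ [q.2])) PySem.Dict.empty := by
    rw [pvPairs, List.foldl_map]
  have hkeys : ((pvPairs digests key).foldl (fun d q => d.modify q.1 [] (· ++ [q.2]))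
      PySem.Dict.empty).keys = PySem.Set.ofList (pvKs digests key) := by
    rw [PySem.Dict.keys_foldl_modify_key (pvPairs digests key) (fun q => q.1) []
      (fun _ q => (· ++ [q.2])) PySem.Dict.empty, ← map_fst_pvPairs digests key]
    rfl
  have hnodup : ((pvPairs digests key).foldl (fun d q => d.modify q.1 [] (· ++ [q.2]))
      PySem.Dict.empty).keys.Nodup :=
    PySem.Dict.nodup_keys_foldl_modify_key (pvPairs digests key) (fun q => q.1) []
      (fun _ q => (· ++ [q.2])) PySem.Dict.empty PySem.Dict.nodup_keys_empty
  have hgetD : ∀ k, ((pvPairs digests key).foldl (fun d q => d.modify q.1 [] (· ++ [q.2]))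
      PySem.Dict.empty).getD k [] = pvGrp digests key k := by
    intro k
    rw [PySem.Dict.getD_foldl_modify_append]
    simp [pvGrp]
  have hvals : ((pvPairs digests key).foldl (fun d q => d.modify q.1 [] (· ++ [q.2]))
      PySem.Dict.empty).values = (PySem.Set.ofList (pvKs digests key)).map (pvGrp digests key) := by
    rw [PySem.Dict.values_eq_map_keys _ hnodup [], hkeys]
    exact List.map_congr_left (fun k _ => hgetD k)
  simp only [hfold, hvals]
  rw [show (fun k => decide ((pvGrp digests key k).length ≠ 1))
      = ((fun g : List Int => decide (g.length ≠ 1)) ∘ (pvGrp digests key)) from rfl,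
    ← List.filter_map]
  have : (List.foldl (fun res paths => if paths.length ≠ 1 then res ++ [paths] else res) []
      ((PySem.Set.ofList (pvKs digests key)).map (pvGrp digests key)))
      = [] ++ (((PySem.Set.ofList (pvKs digests key)).map (pvGrp digests key)).filter
          (fun g => decide (g.length ≠ 1))).map id := by
    rw [← PySem.List.foldl_append_if (fun g : List Int => decide (g.length ≠ 1)) id]
    simp
  simpa using this

-- folding Set.add skips occurrences of a key already in the accumulator
theorem foldl_add_filter_ne {α : Type} [BEq α] [LawfulBEq α] (k : α) :
    ∀ (t : List α) (s : PySem.Set α), PySem.Set.contains s k = true →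
      t.foldl PySem.Set.add s = (t.filter (fun x => !(x == k))).foldl PySem.Set.add s := by
  intro t
  induction t with
  | nil => intro s _; rfl
  | cons x t ih =>
    intro s hs
    by_cases hx : (x == k) = true
    · have hxk : x = k := eq_of_beq hx
      have hadd : PySem.Set.add s x = s := by
        unfold PySem.Set.add
        rw [hxk, if_pos hs]
      simp only [List.filter_cons, hx, Bool.not_true, List.foldl_cons, hadd]
      exact ih s hs
    · have hcontains : PySem.Set.contains (PySem.Set.add s x) k = true := by
        unfold PySem.Set.add
        by_cases hc : PySem.Set.contains s x = true
        · rw [if_pos hc]; exact hs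
        · rw [if_neg hc]
          have : k ∈ s := by simpa [PySem.Set.contains, List.elem_iff, List.contains_iff_mem] using hs
          simp [PySem.Set.contains, List.mem_append, this]
      simp only [List.filter_cons, hx, Bool.not_false, List.foldl_cons]
      exact ih (PySem.Set.add s x) hcontains

-- an element foreign to the rest of the fold floats to the head of the accumulator
theorem foldl_add_cons {α : Type} [BEq α] [LawfulBEq α] (k : α) :
    ∀ (t : List α) (s : PySem.Set α), (∀ x ∈ t, (x == k) = false) →
      t.foldl PySem.Set.add (k :: s) = k :: t.foldl PySem.Set.add s := by
  intro t
  induction t with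
  | nil => intro s _; rfl
  | cons x t ih =>
    intro s hall
    have hx : (x == k) = false := hall x (List.mem_cons_self)
    have hstep : PySem.Set.add (k :: s) x = k :: PySem.Set.add s x := by
      unfold PySem.Set.add
      have hck : PySem.Set.contains (k :: s) x = PySem.Set.contains s x := by
        simp only [PySem.Set.contains, List.contains_cons]
        have : (x == k) = false := hx
        simp [this]
      by_cases hc : PySem.Set.contains s x = true
      · rw [hck, if_pos hc, if_pos hc]
      · rw [hck, if_neg hc, if_neg hc]
        rfl
    simp only [List.foldl_cons, hstep]
    exact ih (PySem.Set.add s x) (fun y hy => hall y (List.mem_cons_of_mem _ hy))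

-- first-occurrence dedup, in B's remove-and-recurse shape
theorem ofList_cons_filter {α : Type} [BEq α] [LawfulBEq α] (k : α) (t : List α) :
    PySem.Set.ofList (k :: t) = k :: PySem.Set.ofList (t.filter (fun x => !(x == k))) := by
  have h0 : PySem.Set.ofList (k :: t) = t.foldl PySem.Set.add [k] := by
    rw [PySem.Set.ofList_eq_foldl]
    rfl
  have hk : PySem.Set.contains ([k] : PySem.Set α) k = true := by
    simp [PySem.Set.contains]
  rw [h0, foldl_add_filter_ne k t [k] hk,
    foldl_add_cons k (t.filter (fun x => !(x == k))) []
      (fun x hx => by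
        have := (List.mem_filter.mp hx).2
        simpa using this),
    PySem.Set.ofList_eq_foldl]

-- B's recursion, characterized against the same first-occurrence key set
theorem collect_eq (keys : List String) :
    ∀ (rem : List String),
      strictAltCollect keys rem =
        ((PySem.Set.ofList rem).filter (fun k => decide (1 < (pvGrpE keys k).length))).map
          (pvGrpE keys) := by
  suffices h : ∀ (n : Nat) (rem : List String), rem.length ≤ n →
      strictAltCollect keys rem =
        ((PySem.Set.ofList rem).filter (fun k => decide (1 < (pvGrpE keys k).length))).map
          (pvGrpE keys) by
    intro rem; exact h rem.length rem le_rfl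
  intro n
  induction n with
  | zero =>
    intro rem h
    have : rem = [] := List.eq_nil_of_length_eq_zero (Nat.le_zero.mp h)
    subst this
    rw [strictAltCollect.eq_def]
    rfl
  | succ n ih =>
    intro rem h
    match rem with
    | [] => rw [strictAltCollect.eq_def]; rfl
    | k :: t =>
      have hlen : (t.filter (fun x => !(x == k))).length ≤ n :=
        le_trans (List.length_filter_le _ _) (Nat.le_of_succ_le_succ (by simpa using h))
      rw [strictAltCollect.eq_def, ofList_cons_filter]
      simp only []
      simp only [List.filter_cons]
      by_cases hb : 1 < (pvGrpE keys k).length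
      · have hd : decide (1 < (pvGrpE keys k).length) = true := decide_eq_true hb
        simp only [hd, if_pos (show 1 < (((PySem.List.enumerate keys).filter
            (fun q => q.2 == k)).map (·.1)).length from hb)]
        rw [ih _ hlen]
        rfl
      · have hd : decide (1 < (pvGrpE keys k).length) = false := decide_eq_false hb
        simp only [hd, if_neg (show ¬ 1 < (((PySem.List.enumerate keys).filter
            (fun q => q.2 == k)).map (·.1)).length from hb)]
        rw [ih _ hlen]
        simp

-- enumerate commutes with map on the elements
theorem enumerate_map {α β : Type} (f : α → β) :
    ∀ (xs : List α) (s : Int),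
      PySem.List.enumerate (xs.map f) s = (PySem.List.enumerate xs s).map (fun p => (p.1, f p.2)) := by
  intro xs
  induction xs with
  | nil => intro s; simp [PySem.List.enumerate_nil]
  | cons x xs ih =>
    intro s
    simp [PySem.List.enumerate_cons, ih]

-- B's scanned group is A's dict group
theorem pvGrpE_eq_pvGrp (digests : List (List (String × String))) (key : String) (k : String) :
    pvGrpE (pvKs digests key) k = pvGrp digests key k := by
  rw [pvGrpE, pvKs, enumerate_map, pvGrp, pvPairs, List.filter_map, List.filter_map,
    List.map_map, List.map_map]
  rfl

-- ===== VERDICT (by name: the statement is the Claim_ definition above) =====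
theorem strict_spec : Claim_equal_strict := by
  intro digests key _hdom _hpre
  unfold Spec_strict
  have halt : strict_alt digests key =
      ((PySem.Set.ofList (pvKs digests key)).filter
        (fun k => decide (1 < (pvGrp digests key k).length))).map (pvGrp digests key) := by
    show strictAltCollect (pvKs digests key) (pvKs digests key) = _
    rw [collect_eq]
    have hfun : (fun k => decide (1 < (pvGrpE (pvKs digests key) k).length))
        = (fun k => decide (1 < (pvGrp digests key k).length)) := by
      funext k; rw [pvGrpE_eq_pvGrp]
    rw [hfun]
    exact List.map_congr_left (fun k _ => pvGrpE_eq_pvGrp digests key k)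
  rw [strict_eq_filter, halt]
  have hcongr : (PySem.Set.ofList (pvKs digests key)).filter
      (fun k => decide ((pvGrp digests key k).length ≠ 1))
      = (PySem.Set.ofList (pvKs digests key)).filter
        (fun k => decide (1 < (pvGrp digests key k).length)) := by
    apply List.filter_congr
    intro k hk
    have hmem : k ∈ pvKs digests key := (PySem.Set.mem_ofList _ _).mp hk
    have hcount : 1 ≤ (pvKs digests key).count k := List.one_le_count_iff.mpr hmem
    have hlen := pvGrp_length digests key k
    simp only [decide_eq_decide]
    omega
  rw [hcongr]
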